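-- pv_equiv track=rewrite | github.com/DFKI-NLP/covid19-law-matching | training/experiment2.py | create_inspection_list
-- ===== SOURCE A (Python) =====
-- def check_token(prediction, label):
--     if prediction == 0 and label == 0:
--         "Correctly predicted as not being part of a claim"
--         return "black"
--     if prediction == 1 and label == 1:
--         "Correctly predicted as the claim start"
--         return "green"
--     if prediction == 2 and label == 2:
--         "Correctly predicted as being part of the claim"
--         return "green"
--     if prediction == 1 and label == 2:
--         "Correctly predicted as claim, but should be inside of claim"
--         return "lightgreen"
--     if prediction == 2 and label == 1:
--         "Correctly predicted as claim, but should be new of claim"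
--         return "darkgreen"
--     if prediction == 0 and label in [1, 2]:
--         "Incorrectly not labeled as claim"
--         return "red"
--     if prediction in [1, 2] and label == 0:
--         "Incorrectly labeled as claim"
--         return "blue"
--     return "white"
--
-- def create_inspection_list(preds, labels, input_ids):
--     previous_token = None
--     chunks = []
--     current_chunk = None
--     for i in range(len(input_ids)):
--         current_token = check_token(preds[i], labels[i])
--
--         if previous_token is None or current_token != previous_token:
--             "New chunk"
--             if current_chunk is not None:
--                 chunks.append(current_chunk)
--             current_chunk = (current_token, [input_ids[i]])
--         else:
--             current_chunk[1].append(input_ids[i])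
--
--         previous_token = current_token
--
--     return chunks
-- ===== SOURCE B (Python) =====
-- def check_token(prediction, label):
--     if prediction == 0 and label == 0:
--         return "black"
--     if prediction == 1 and label == 1:
--         return "green"
--     if prediction == 2 and label == 2:
--         return "green"
--     if prediction == 1 and label == 2:
--         return "lightgreen"
--     if prediction == 2 and label == 1:
--         return "darkgreen"
--     if prediction == 0 and label in [1, 2]:
--         return "red"
--     if prediction in [1, 2] and label == 0:
--         return "blue"
--     return "white"
--
--
-- def create_inspection_list(preds, labels, input_ids):
--     # Change-point algorithm: classify every token, compute the indices where a
--     # new run of equal colors starts, then slice input_ids between consecutive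
--     # change points.  zip(starts, starts[1:]) pairs each run start with the next
--     # one, so the trailing run (which A's loop never flushes) has no end point
--     # and is naturally absent.
--     n = len(input_ids)
--     colors = [check_token(preds[i], labels[i]) for i in range(n)]
--     starts = [i for i in range(n) if i == 0 or colors[i] != colors[i - 1]]
--     return [(colors[s], input_ids[s:e]) for s, e in zip(starts, starts[1:])]
-- ===== Notes on version B (the rewrite author's own statement) =====
-- stated objective: alternative
-- what changed: Replaces A's previous_token/current_chunk state machine with a change-point algorithm: classify every token into a color list, collect the indices where a new color run starts, and slice input_ids between consecutive change points (zip(starts, starts[1:]) naturally omits the trailing run that A's loop never flushes).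
import Mathlib
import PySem

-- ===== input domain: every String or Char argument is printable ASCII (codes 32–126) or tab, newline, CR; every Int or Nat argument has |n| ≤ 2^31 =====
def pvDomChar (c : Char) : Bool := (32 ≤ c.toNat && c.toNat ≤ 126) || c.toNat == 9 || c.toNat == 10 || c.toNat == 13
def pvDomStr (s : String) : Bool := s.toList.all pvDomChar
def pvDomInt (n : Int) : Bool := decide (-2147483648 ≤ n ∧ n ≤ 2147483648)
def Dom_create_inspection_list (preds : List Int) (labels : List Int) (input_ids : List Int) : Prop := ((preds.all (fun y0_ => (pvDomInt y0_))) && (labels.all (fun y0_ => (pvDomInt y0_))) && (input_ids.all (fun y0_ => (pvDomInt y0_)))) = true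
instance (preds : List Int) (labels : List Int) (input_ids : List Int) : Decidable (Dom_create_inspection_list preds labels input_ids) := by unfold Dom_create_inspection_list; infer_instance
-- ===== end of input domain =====

-- B replaces A's previous_token/current_chunk state machine by a change-point algorithm: classify all
-- tokens, list the indices where a new color run starts, slice input_ids between consecutive change
-- points (the trailing run, which A never flushes, has no end point and is naturally absent).

-- ===== PORT A =====
-- shared module helper check_token (used verbatim by both Python versions)
def check_token (prediction : Int) (label : Int) : String :=
  if prediction = 0 ∧ label = 0 then "black"
  else if prediction = 1 ∧ label = 1 then "green"
  else if prediction = 2 ∧ label = 2 then "green"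
  else if prediction = 1 ∧ label = 2 then "lightgreen"
  else if prediction = 2 ∧ label = 1 then "darkgreen"
  else if prediction = 0 ∧ (label = 1 ∨ label = 2) then "red"
  else if (prediction = 1 ∨ prediction = 2) ∧ label = 0 then "blue"
  else "white"

-- literal port of A's loop: state (previous_token, chunks, current_chunk) over range(len(input_ids))
def create_inspection_list (preds : List Int) (labels : List Int) (input_ids : List Int) : List (String × List Int) :=
  let st := (PySem.List.pyRange 0 (input_ids.length : Int) 1).foldl
    (fun (st : Option String × List (String × List Int) × Option (String × List Int)) i =>
      let current_token := check_token (PySem.List.pyGetD preds i 0) (PySem.List.pyGetD labels i 0)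
      match st with
      | (previous_token, chunks, current_chunk) =>
        if previous_token = none ∨ previous_token ≠ some current_token then
          (some current_token,
           (match current_chunk with | none => chunks | some k => chunks ++ [k]),
           some (current_token, [PySem.List.pyGetD input_ids i 0]))
        else
          (some current_token, chunks,
           current_chunk.map (fun k => (k.1, k.2 ++ [PySem.List.pyGetD input_ids i 0]))))
    (none, [], none)
  st.2.1

-- ===== PORT B =====
-- colors = [check_token(preds[i], labels[i]) for i in range(n)]
-- starts = [i for i in range(n) if i == 0 or colors[i] != colors[i-1]]
-- return [(colors[s], input_ids[s:e]) for s, e in zip(starts, starts[1:])]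
def create_inspection_list_alt (preds : List Int) (labels : List Int) (input_ids : List Int) : List (String × List Int) :=
  let n : Int := (input_ids.length : Int)
  let colors := (PySem.List.pyRange 0 n 1).map
    (fun i => check_token (PySem.List.pyGetD preds i 0) (PySem.List.pyGetD labels i 0))
  let starts := (PySem.List.pyRange 0 n 1).filter
    (fun i => i == 0 || !(PySem.List.pyGetD colors i "" == PySem.List.pyGetD colors (i - 1) ""))
  (starts.zip (PySem.List.slice starts (some 1) none)).map
    (fun p => (PySem.List.pyGetD colors p.1 "", PySem.List.slice input_ids (some p.1) (some p.2)))

-- ===== PRECONDITION & SPEC =====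
-- Pre_ excludes exactly the inputs where Python A raises IndexError: preds or labels shorter than input_ids.
def Pre_create_inspection_list (preds : List Int) (labels : List Int) (input_ids : List Int) : Prop :=
  input_ids.length ≤ preds.length ∧ input_ids.length ≤ labels.length
instance (preds : List Int) (labels : List Int) (input_ids : List Int) : Decidable (Pre_create_inspection_list preds labels input_ids) := by unfold Pre_create_inspection_list; infer_instance
def pvWitness_create_inspection_list : List Int × List Int × List Int := ([0, 1, 2], [0, 2, 2], [7, 8, 9])

def Spec_create_inspection_list (preds : List Int) (labels : List Int) (input_ids : List Int) (out : List (String × List Int)) : Prop := out = create_inspection_list_alt preds labels input_ids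
instance (preds : List Int) (labels : List Int) (input_ids : List Int) (out : List (String × List Int)) : Decidable (Spec_create_inspection_list preds labels input_ids out) := by unfold Spec_create_inspection_list; infer_instance

-- ===== CLAIM (what is proved, stated in full; the proofs are below) =====
def Claim_equal_create_inspection_list : Prop := ∀ (preds : List Int) (labels : List Int) (input_ids : List Int), Dom_create_inspection_list preds labels input_ids → Pre_create_inspection_list preds labels input_ids → Spec_create_inspection_list preds labels input_ids (create_inspection_list preds labels input_ids)

-- ===== LEMMAS AND PROOFS =====

-- reference form both ports are reduced to: the consecutive runs of the color/id pair list
def groupby_runs : List (String × Int) → List (String × List Int)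
  | [] => []
  | (c, x) :: rest =>
    match groupby_runs rest with
    | [] => [(c, [x])]
    | (c', xs) :: gs => if c = c' then (c, x :: xs) :: gs else (c, [x]) :: (c', xs) :: gs

-- ---- A side (state machine = dropLast of the runs) ----

-- the pair-consuming step function underlying A's loop
def stepP (st : Option String × List (String × List Int) × Option (String × List Int))
    (p : String × Int) : Option String × List (String × List Int) × Option (String × List Int) :=
  match st, p with
  | (previous_token, chunks, current_chunk), (c, x) =>
    if previous_token = none ∨ previous_token ≠ some c then
      (some c, (match current_chunk with | none => chunks | some k => chunks ++ [k]), some (c, [x]))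
    else
      (some c, chunks, current_chunk.map (fun k => (k.1, k.2 ++ [x])))

-- full-group list when the open chunk is (c, l) and ps remains to be processed
def G (c : String) (l : List Int) : List (String × Int) → List (String × List Int)
  | [] => [(c, l)]
  | (c', x) :: rest => if c' = c then G c (l ++ [x]) rest else (c, l) :: G c' [x] rest

def merge (c : String) (l : List Int) : List (String × List Int) → List (String × List Int)
  | [] => [(c, l)]
  | (c', xs) :: gs => if c' = c then (c, l ++ xs) :: gs else (c, l) :: (c', xs) :: gs

theorem G_ne_nil (c : String) (l : List Int) (ps : List (String × Int)) : G c l ps ≠ [] := by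
  induction ps generalizing c l with
  | nil => simp [G]
  | cons p rest ih =>
    obtain ⟨c', x⟩ := p
    simp only [G]
    split
    · exact ih _ _
    · simp

theorem G_eq_merge (ps : List (String × Int)) (c : String) (l : List Int) :
    G c l ps = merge c l (groupby_runs ps) := by
  induction ps generalizing c l with
  | nil => simp [G, groupby_runs, merge]
  | cons p rest ih =>
    obtain ⟨c'', x⟩ := p
    by_cases h : c'' = c
    · subst h
      rw [show G c'' l ((c'', x) :: rest) = G c'' (l ++ [x]) rest by simp [G], ih]
      simp only [groupby_runs]
      cases hg : groupby_runs rest with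
      | nil => simp [merge]
      | cons g gs =>
        obtain ⟨c', xs⟩ := g
        by_cases h2 : c'' = c'
        · subst h2; simp [merge]
        · have h3 : ¬c' = c'' := fun hh => h2 hh.symm
          simp [merge, h2, h3]
    · rw [show G c l ((c'', x) :: rest) = (c, l) :: G c'' [x] rest by simp [G, h], ih]
      simp only [groupby_runs]
      cases hg : groupby_runs rest with
      | nil => simp [merge, h]
      | cons g gs =>
        obtain ⟨c', xs⟩ := g
        by_cases h2 : c'' = c'
        · subst h2; simp [merge, h]
        · have h3 : ¬c' = c'' := fun hh => h2 hh.symm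
          simp [merge, h, h2, h3]

theorem groupby_runs_cons (c : String) (x : Int) (rest : List (String × Int)) :
    groupby_runs ((c, x) :: rest) = merge c [x] (groupby_runs rest) := by
  simp only [groupby_runs]
  cases groupby_runs rest with
  | nil => simp [merge]
  | cons g gs =>
    obtain ⟨c', xs⟩ := g
    by_cases h : c = c'
    · subst h; simp [merge]
    · have h3 : ¬c' = c := fun hh => h hh.symm
      simp [merge, h, h3]

theorem loop_inv (ps : List (String × Int)) (c : String) (l : List Int)
    (chunks : List (String × List Int)) :
    (ps.foldl stepP (some c, chunks, some (c, l))).2.1 = chunks ++ (G c l ps).dropLast := by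
  induction ps generalizing c l chunks with
  | nil => simp [G]
  | cons p rest ih =>
    obtain ⟨c', x⟩ := p
    by_cases h : c' = c
    · subst h
      rw [show ((c', x) :: rest).foldl stepP (some c', chunks, some (c', l))
            = rest.foldl stepP (some c', chunks, some (c', l ++ [x])) by simp [stepP]]
      rw [ih]
      simp [G]
    · have h' : ¬ c = c' := fun hh => h hh.symm
      rw [show ((c', x) :: rest).foldl stepP (some c, chunks, some (c, l))
            = rest.foldl stepP (some c', chunks ++ [(c, l)], some (c', [x])) by
          simp [stepP, h']]
      rw [ih]
      rw [show G c l ((c', x) :: rest) = (c, l) :: G c' [x] rest by simp [G, h]]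
      rw [List.dropLast_cons_of_ne_nil (G_ne_nil c' [x] rest)]
      simp

theorem fold_eq_groups (ps : List (String × Int)) :
    (ps.foldl stepP ((none : Option String), ([] : List (String × List Int)),
      (none : Option (String × List Int)))).2.1 = (groupby_runs ps).dropLast := by
  cases ps with
  | nil => simp [groupby_runs]
  | cons p rest =>
    obtain ⟨c, x⟩ := p
    rw [show ((c, x) :: rest).foldl stepP (none, [], none)
          = rest.foldl stepP (some c, [], some (c, [x])) by simp [stepP]]
    rw [loop_inv, G_eq_merge, ← groupby_runs_cons]
    simp

theorem zip_range_map (xs : List Int) (f : Int → String) :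
    ((PySem.List.pyRange 0 (xs.length : Int) 1).map f).zip xs
      = (PySem.List.pyRange 0 (xs.length : Int) 1).map
          (fun i => (f i, PySem.List.pyGetD xs i 0)) := by
  apply List.ext_getElem
  · simp [PySem.List.length_pyRange_one]
  · intro k h1 h2
    have hk : k < xs.length := by
      simpa [PySem.List.length_pyRange_one] using h2
    simp only [List.getElem_zip, List.getElem_map, PySem.List.getElem_pyRange_one]
    have : PySem.List.pyGetD xs ((0 : Int) + k) 0 = xs[((0 : Int) + k).toNat] := by
      apply PySem.List.pyGetD_eq_getElem
      · omega
      · omega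
    rw [this]
    simp

-- ---- B side (change points + slicing = dropLast of the runs) ----

-- positions (counted inside cs) where the color differs from its predecessor (prev heads the list)
def chPts : String → List String → List Nat
  | _, [] => []
  | prev, c :: cs => if c = prev then (chPts c cs).map (· + 1) else 0 :: (chPts c cs).map (· + 1)

def pairsOf {α : Type} (l : List α) : List (α × α) := l.zip l.tail

def sliceF (l : List String) (xs : List Int) (p : Nat × Nat) : String × List Int :=
  (l.getD p.1 "", (xs.drop p.1).take (p.2 - p.1))

theorem pairsOf_cons_cons {α : Type} (a b : α) (l : List α) :
    pairsOf (a :: b :: l) = (a, b) :: pairsOf (b :: l) := rfl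

theorem pairsOf_map {α β : Type} (f : α → β) (l : List α) :
    pairsOf (l.map f) = (pairsOf l).map (fun p => (f p.1, f p.2)) := by
  induction l with
  | nil => rfl
  | cons a l ih =>
    cases l with
    | nil => rfl
    | cons b l2 =>
      rw [show (a :: b :: l2).map f = f a :: f b :: l2.map f from rfl, pairsOf_cons_cons,
        show f b :: l2.map f = (b :: l2).map f from rfl, ih, pairsOf_cons_cons]
      rfl

theorem pairsOf_snoc {α : Type} (ss : List α) (b : α) (hs : ss ≠ []) :
    pairsOf (ss ++ [b]) = pairsOf ss ++ [(ss.getLast hs, b)] := by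
  induction ss with
  | nil => exact absurd rfl hs
  | cons a ss ih =>
    cases ss with
    | nil => rfl
    | cons a2 ss2 =>
      rw [show (a :: a2 :: ss2) ++ [b] = a :: ((a2 :: ss2) ++ [b]) from rfl]
      rw [show (a2 :: ss2) ++ [b] = a2 :: (ss2 ++ [b]) from rfl]
      rw [pairsOf_cons_cons, show a2 :: (ss2 ++ [b]) = (a2 :: ss2) ++ [b] from rfl,
        ih (by simp), pairsOf_cons_cons]
      simp [List.getLast]

theorem sliceF_shift (c0 : String) (l : List String) (x0 : Int) (xs0 : List Int) (p : Nat × Nat) :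
    sliceF (c0 :: l) (x0 :: xs0) (p.1 + 1, p.2 + 1) = sliceF l xs0 p := by
  simp [sliceF]

theorem full_eq (cs : List String) (c : String) (xs : List Int) (x : Int)
    (h : cs.length = xs.length) :
    (pairsOf ((0 :: (chPts c cs).map (· + 1)) ++ [cs.length + 1])).map (sliceF (c :: cs) (x :: xs))
      = groupby_runs ((c :: cs).zip (x :: xs)) := by
  induction cs generalizing c x xs with
  | nil =>
    cases xs with
    | nil => simp [pairsOf, chPts, sliceF, groupby_runs]
    | cons y ys => simp at h
  | cons c' cs' ih =>
    cases xs with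
    | nil => simp at h
    | cons x' ys =>
      have h' : cs'.length = ys.length := by simpa using h
      obtain ⟨r, R', hR⟩ : ∃ r R', (chPts c' cs').map (· + 1) ++ [cs'.length + 1] = r :: R' := by
        cases hh : (chPts c' cs').map (· + 1) ++ [cs'.length + 1] with
        | nil => simp at hh
        | cons a b => exact ⟨a, b, rfl⟩
      have ihh := ih c' ys x' h'
      rw [List.cons_append, hR] at ihh
      by_cases hc : c' = c
      · subst hc
        have hmap : ((chPts c' cs').map (· + 1) ++ [cs'.length + 1]).map (· + 1)
            = (r + 1) :: R'.map (· + 1) := by rw [hR]; rfl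
        have hL : (0 : Nat) :: (chPts c' (c' :: cs')).map (· + 1) ++ [(c' :: cs').length + 1]
            = 0 :: (r + 1) :: R'.map (· + 1) := by
          simp only [chPts, if_pos rfl]
          rw [← hmap]
          simp [List.map_map, Function.comp]
        rw [hL, pairsOf_cons_cons,
          show (r + 1) :: R'.map (· + 1) = (r :: R').map (· + 1) from rfl,
          pairsOf_map, List.map_cons, List.map_map]
        have hshift : (sliceF (c' :: c' :: cs') (x :: x' :: ys)) ∘ (fun p : Nat × Nat => (p.1 + 1, p.2 + 1))
            = sliceF (c' :: cs') (x' :: ys) := by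
          funext p; exact sliceF_shift _ _ _ _ p
        rw [hshift]
        rw [pairsOf_cons_cons, List.map_cons] at ihh
        rw [show ((c' :: c' :: cs').zip (x :: x' :: ys)) = (c', x) :: ((c' :: cs').zip (x' :: ys)) from rfl]
        simp only [groupby_runs]
        rw [← ihh]
        simp [sliceF]
      · have hmap : ((chPts c' cs').map (· + 1) ++ [cs'.length + 1]).map (· + 1)
            = (r + 1) :: R'.map (· + 1) := by rw [hR]; rfl
        have hL : (0 : Nat) :: (chPts c (c' :: cs')).map (· + 1) ++ [(c' :: cs').length + 1]
            = 0 :: 1 :: (r :: R').map (· + 1) := by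
          simp only [chPts, if_neg hc]
          rw [show (r :: R').map (· + 1) = (r + 1) :: R'.map (· + 1) from rfl, ← hmap]
          simp [List.map_map, Function.comp]
        rw [hL, pairsOf_cons_cons,
          show (1 : Nat) :: (r :: R').map (· + 1) = (0 :: r :: R').map (· + 1) from rfl,
          pairsOf_map, List.map_cons, List.map_map]
        have hshift : (sliceF (c :: c' :: cs') (x :: x' :: ys)) ∘ (fun p : Nat × Nat => (p.1 + 1, p.2 + 1))
            = sliceF (c' :: cs') (x' :: ys) := by
          funext p; exact sliceF_shift _ _ _ _ p
        rw [hshift]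
        rw [pairsOf_cons_cons, List.map_cons] at ihh
        rw [pairsOf_cons_cons, List.map_cons]
        rw [show ((c :: c' :: cs').zip (x :: x' :: ys)) = (c, x) :: ((c' :: cs').zip (x' :: ys)) from rfl]
        simp only [groupby_runs]
        rw [← ihh]
        have hc2 : ¬ c = c' := fun h => hc h.symm
        simp [sliceF, hc2]

theorem natB_eq (cs : List String) (c : String) (xs : List Int) (x : Int)
    (h : cs.length = xs.length) :
    (pairsOf (0 :: (chPts c cs).map (· + 1))).map (sliceF (c :: cs) (x :: xs))
      = (groupby_runs ((c :: cs).zip (x :: xs))).dropLast := by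
  rw [← full_eq cs c xs x h, pairsOf_snoc _ _ (by simp), List.map_append]
  simp

theorem filter_aux (prev : String) (cs : List String) :
    (List.range cs.length).filter (fun i => !(cs.getD i "" == (prev :: cs).getD i ""))
      = chPts prev cs := by
  induction cs generalizing prev with
  | nil => simp [chPts]
  | cons c cs ih =>
    rw [show (c :: cs).length = cs.length + 1 from rfl, List.range_succ_eq_map, List.filter_cons,
      List.filter_map]
    have hcomp : ((fun i => !((c :: cs).getD i "" == (prev :: c :: cs).getD i "")) ∘ Nat.succ)
        = (fun i => !(cs.getD i "" == (c :: cs).getD i "")) := by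
      funext i; simp
    rw [hcomp, ih]
    simp only [chPts]
    by_cases h : c = prev
    · simp [h, Nat.succ_eq_add_one]
    · simp [h, Nat.succ_eq_add_one]

def natStarts (l : List String) : List Nat :=
  (List.range l.length).filter (fun i => decide (i = 0) || !(l.getD i "" == l.getD (i - 1) ""))

theorem natStarts_cons (c : String) (cs : List String) :
    natStarts (c :: cs) = 0 :: (chPts c cs).map (· + 1) := by
  unfold natStarts
  rw [show (c :: cs).length = cs.length + 1 from rfl, List.range_succ_eq_map, List.filter_cons,
    List.filter_map]
  have hcomp : ((fun i => decide (i = 0) || !((c :: cs).getD i "" == (c :: cs).getD (i - 1) "")) ∘ Nat.succ)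
      = (fun i => !(cs.getD i "" == (c :: cs).getD i "")) := by
    funext i; simp
  rw [hcomp, filter_aux c cs]
  simp [Nat.succ_eq_add_one]

theorem alt_eq (preds labels input_ids : List Int) :
    create_inspection_list_alt preds labels input_ids
      = (groupby_runs
          (((PySem.List.pyRange 0 (input_ids.length : Int) 1).map
              (fun i => check_token (PySem.List.pyGetD preds i 0) (PySem.List.pyGetD labels i 0))).zip
            input_ids)).dropLast := by
  unfold create_inspection_list_alt
  dsimp only
  have hcl : ((PySem.List.pyRange 0 (input_ids.length : Int) 1).map
      (fun i => check_token (PySem.List.pyGetD preds i 0) (PySem.List.pyGetD labels i 0))).length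
      = input_ids.length := by
    simp [PySem.List.length_pyRange_one]
  generalize ((PySem.List.pyRange 0 (input_ids.length : Int) 1).map
      (fun i => check_token (PySem.List.pyGetD preds i 0) (PySem.List.pyGetD labels i 0))) = colors at hcl ⊢
  -- starts = (natStarts colors).map Nat.cast
  have hstarts : (PySem.List.pyRange 0 (input_ids.length : Int) 1).filter
        (fun i => i == 0 || !(PySem.List.pyGetD colors i "" == PySem.List.pyGetD colors (i - 1) ""))
      = (natStarts colors).map (fun k : Nat => (k : Int)) := by
    rw [PySem.List.pyRange_zero_natCast, List.filter_map]
    unfold natStarts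
    rw [hcl]
    congr 1
    apply List.filter_congr
    intro i _
    cases i with
    | zero => simp
    | succ j =>
      simp only [Function.comp_apply]
      have h1 : ((j + 1 : Nat) : Int) - 1 = ((j : Nat) : Int) := by push_cast; ring
      rw [h1, PySem.List.pyGetD_natCast, PySem.List.pyGetD_natCast]
      simp
      all_goals (intro hc0; omega)
  rw [hstarts, PySem.List.slice_from_one, ← List.map_tail, List.zip_map, List.map_map]
  have hfun : ((fun p : Int × Int => (PySem.List.pyGetD colors p.1 "",
        PySem.List.slice input_ids (some p.1) (some p.2))) ∘
        Prod.map (fun k : Nat => (k : Int)) (fun k : Nat => (k : Int)))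
      = sliceF colors input_ids := by
    funext p
    obtain ⟨a, b⟩ := p
    simp [Prod.map, sliceF, PySem.List.pyGetD_natCast, PySem.List.slice_natCast]
  rw [hfun]
  cases colors with
  | nil =>
    have : input_ids = [] := by
      cases input_ids with
      | nil => rfl
      | cons y ys => simp at hcl
    subst this
    simp [natStarts, groupby_runs]
  | cons c cs =>
    cases input_ids with
    | nil => simp at hcl
    | cons x xs =>
      have h : cs.length = xs.length := by simpa using hcl
      rw [natStarts_cons]
      exact natB_eq cs c xs x h

-- ===== VERDICT (by name: the statement is the Claim_ definition above) =====
theorem create_inspection_list_spec : Claim_equal_create_inspection_list := by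
  intro preds labels input_ids _ _
  unfold Spec_create_inspection_list
  rw [alt_eq]
  unfold create_inspection_list
  dsimp only
  rw [zip_range_map input_ids
        (fun i => check_token (PySem.List.pyGetD preds i 0) (PySem.List.pyGetD labels i 0))]
  rw [← fold_eq_groups, List.foldl_map]
  rfl
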